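-- pv_equiv track=rewrite | github.com/L1nkiZ/Cours_Python | TP3.py | est_adn
-- ===== SOURCE A (Python) =====
-- def est_adn(chaine):
--     val = len(chaine)
--     bo = True
--     for i in range(val):
--         if chaine[i] == 'A' or chaine[i] == 'C' or chaine[i] == 'G' or chaine[i] == 'T':
--             bo = True
--         else:
--             bo= False
--         if bo == False:
--             return bo
--     return bo
-- ===== SOURCE B (Python) =====
-- def est_adn(chaine):
--     return set(chaine) <= {'A', 'C', 'G', 'T'}
-- ===== Notes on version B (the rewrite author's own statement) =====
-- stated objective: idiomatic
-- what changed: Replaces the index-based loop with a running boolean and early return by building the set of distinct characters once and testing subset inclusion in {'A','C','G','T'}.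
import Mathlib
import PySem

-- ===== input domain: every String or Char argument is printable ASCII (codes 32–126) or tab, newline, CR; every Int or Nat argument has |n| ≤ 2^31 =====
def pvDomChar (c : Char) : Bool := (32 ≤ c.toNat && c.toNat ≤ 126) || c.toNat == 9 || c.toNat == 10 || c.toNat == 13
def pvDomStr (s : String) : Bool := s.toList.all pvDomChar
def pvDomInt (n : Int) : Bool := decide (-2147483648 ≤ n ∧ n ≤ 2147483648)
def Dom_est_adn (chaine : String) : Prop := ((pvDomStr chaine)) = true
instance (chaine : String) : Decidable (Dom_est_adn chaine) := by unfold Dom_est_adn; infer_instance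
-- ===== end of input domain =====

-- B replaces A's index loop with running boolean and early return by a build-the-distinct-set-then-subset test (idiomatic).


-- ===== PORT A =====
-- the 'for i in range(val)' loop: walks the characters in index order, recomputing bo and returning early when it becomes False
def est_adn_loop (cs : List Char) (bo : Bool) : Bool :=
  match cs with
  | [] => bo
  | c :: rest =>
    let bo' := if c == 'A' || c == 'C' || c == 'G' || c == 'T' then true else false
    if bo' == false then bo' else est_adn_loop rest bo'

def est_adn (chaine : String) : Bool :=
  est_adn_loop chaine.toList true

-- ===== PORT B =====
-- set(chaine) <= {'A','C','G','T'}
def est_adn_alt (chaine : String) : Bool :=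
  PySem.Set.issubset (PySem.Set.ofList chaine.toList) (PySem.Set.ofList ['A', 'C', 'G', 'T'])

-- ===== PRECONDITION & SPEC =====
def Spec_est_adn (chaine : String) (out : Bool) : Prop := out = est_adn_alt chaine
instance (chaine : String) (out : Bool) : Decidable (Spec_est_adn chaine out) := by unfold Spec_est_adn; infer_instance

-- ===== CLAIM (what is proved, stated in full; the proofs are below) =====
def Claim_equal_est_adn : Prop := ∀ (chaine : String), Dom_est_adn chaine → Spec_est_adn chaine (est_adn chaine)

-- ===== LEMMAS AND PROOFS =====
-- A's loop started with bo = true computes "every character is a base"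
theorem est_adn_loop_eq_all (cs : List Char) :
    est_adn_loop cs true = cs.all (fun c => c == 'A' || c == 'C' || c == 'G' || c == 'T') := by
  induction cs with
  | nil => rfl
  | cons c rest ih =>
    simp only [est_adn_loop, List.all_cons]
    by_cases h : (c == 'A' || c == 'C' || c == 'G' || c == 'T') = true
    · simp [h, ih]
    · simp [Bool.eq_false_iff.mpr h]

-- B's subset test computes the same predicate over all characters
theorem est_adn_alt_eq_all (chaine : String) :
    est_adn_alt chaine
      = chaine.toList.all (fun c => c == 'A' || c == 'C' || c == 'G' || c == 'T') := by
  unfold est_adn_alt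
  rw [Bool.eq_iff_iff, PySem.Set.issubset_iff, List.all_eq_true]
  constructor
  · intro h c hc
    have := h c ((PySem.Set.mem_ofList chaine.toList c).mpr hc)
    rw [PySem.Set.mem_ofList] at this
    simp only [List.mem_cons, List.not_mem_nil, or_false] at this
    rcases this with h1 | h1 | h1 | h1 <;> simp [h1]
  · intro h c hc
    have hc' := (PySem.Set.mem_ofList chaine.toList c).mp hc
    have := h c hc'
    rw [PySem.Set.mem_ofList]
    simp only [Bool.or_eq_true, beq_iff_eq] at this
    simp only [List.mem_cons, List.not_mem_nil, or_false]
    tauto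

-- ===== VERDICT (by name: the statement is the Claim_ definition above) =====
theorem est_adn_spec : Claim_equal_est_adn := by
  intro chaine _
  unfold Spec_est_adn est_adn
  rw [est_adn_loop_eq_all, est_adn_alt_eq_all]
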